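-- pv_equiv track=rewrite | github.com/MrHamdulay/csc3-capstone | examples/data/Assignment_7/myxgiv001/push.py | push_right
-- ===== SOURCE A (Python) =====
-- def push_right(input_list):
--     list1 = []
--     for i in input_list:
--         if i!=0:
--             list1.append(i)
--     shifted_list = []
--     i = len(list1)-1
--     while i >=0:
--         if i-1>=0 and list1[i] == list1[i-1]:
--             if len(shifted_list) ==0:
--                 shifted_list.append(list1[i]*2)
--             else:
--                 shifted_list.insert(0,list1[i]*2)
--             i -= 2
--         else:
--             shifted_list.insert(0,list1[i])
--             i -= 1
--     for i in range(4-len(shifted_list)):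
--         if len(shifted_list) == 0:
--             shifted_list.append(0)
--         else:
--             shifted_list.insert(0,0)
--
--     return shifted_list
-- ===== SOURCE B (Python) =====
-- def push_right(input_list):
--     out = []
--     val, cnt = 0, 0  # current run of equal nonzero values
--     for x in input_list:
--         if x == 0:
--             continue
--         if cnt != 0 and x == val:
--             cnt += 1
--         else:
--             out += [val] * (cnt % 2) + [2 * val] * (cnt // 2)
--             val, cnt = x, 1
--     out += [val] * (cnt % 2) + [2 * val] * (cnt // 2)
--     return [0] * (4 - len(out)) + out
-- ===== Notes on version B (the rewrite author's own statement) =====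
-- stated objective: faster
-- what changed: Replaces A's right-to-left index-pairing while-loop with insert(0,...) prepends by a single forward run-length pass: each maximal run of c equal nonzero values contributes c%2 singles then c//2 doubled values, with the zero padding computed arithmetically instead of a prepend loop.
import Mathlib
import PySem

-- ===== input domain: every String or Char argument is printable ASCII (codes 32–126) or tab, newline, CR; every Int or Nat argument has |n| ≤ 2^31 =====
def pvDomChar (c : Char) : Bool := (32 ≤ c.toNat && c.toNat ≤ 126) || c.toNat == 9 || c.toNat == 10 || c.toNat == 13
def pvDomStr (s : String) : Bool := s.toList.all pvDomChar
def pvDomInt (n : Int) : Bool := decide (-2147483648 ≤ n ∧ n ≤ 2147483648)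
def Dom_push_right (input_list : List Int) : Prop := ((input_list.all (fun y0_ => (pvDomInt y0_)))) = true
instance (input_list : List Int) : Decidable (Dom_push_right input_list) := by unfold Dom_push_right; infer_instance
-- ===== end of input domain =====

-- B replaces A's right-to-left index-pairing loop by one forward run-length pass
-- (each run of c equal nonzero values yields c%2 singles then c/2 doubled values),
-- padding with zeros arithmetically; objective: faster (no quadratic insert(0,..)).

-- ===== PORT A =====
-- the `while i >= 0` loop; fuel = i+1 (so fuel n+1 means i = n)
def pvAMerge (list1 : List Int) : Nat → List Int → List Int
  | 0, shifted => shifted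
  | n + 1, shifted =>
    if n ≥ 1 ∧ list1.getD n 0 = list1.getD (n - 1) 0 then
      pvAMerge list1 (n - 1)
        (if shifted = [] then shifted ++ [list1.getD n 0 * 2] else list1.getD n 0 * 2 :: shifted)
    else
      pvAMerge list1 n (list1.getD n 0 :: shifted)   -- insert(0, x) = cons
  termination_by n _ => n
  decreasing_by omega; omega

-- the `for i in range(4 - len(shifted_list))` prepend loop
def pvAPad : Nat → List Int → List Int
  | 0, shifted => shifted
  | n + 1, shifted => pvAPad n (if shifted = [] then shifted ++ [0] else 0 :: shifted)

def push_right (input_list : List Int) : List Int :=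
  let list1 := input_list.foldl (fun acc i => if i ≠ 0 then acc ++ [i] else acc) []
  let shifted := pvAMerge list1 list1.length []     -- i starts at len(list1) - 1
  pvAPad (4 - shifted.length) shifted

-- ===== PORT B =====
-- [val] * (cnt % 2) + [2 * val] * (cnt // 2)
def pvEmit (v : Int) (c : Nat) : List Int :=
  List.replicate (c % 2) v ++ List.replicate (c / 2) (2 * v)

-- the single forward loop of B, carrying the current run (val, cnt) and the output
def pvBLoop : List Int → Int → Nat → List Int → List Int
  | [], val, cnt, out => out ++ pvEmit val cnt
  | x :: xs, val, cnt, out =>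
    if x = 0 then pvBLoop xs val cnt out
    else if cnt ≠ 0 ∧ x = val then pvBLoop xs val (cnt + 1) out
    else pvBLoop xs x 1 (out ++ pvEmit val cnt)

def push_right_alt (input_list : List Int) : List Int :=
  let out := pvBLoop input_list 0 0 []
  List.replicate (4 - out.length) 0 ++ out

-- ===== PRECONDITION & SPEC =====
def Spec_push_right (input_list : List Int) (out : List Int) : Prop := out = push_right_alt input_list
instance (input_list : List Int) (out : List Int) : Decidable (Spec_push_right input_list out) := by unfold Spec_push_right; infer_instance

-- ===== CLAIM (what is proved, stated in full; the proofs are below) =====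
def Claim_equal_push_right : Prop := ∀ (input_list : List Int), Dom_push_right input_list → Spec_push_right input_list (push_right input_list)

-- ===== LEMMAS AND PROOFS =====

-- canonical right-to-left pairing on the reversed zero-free list
def pvG : List Int → List Int
  | [] => []
  | [a] => [a]
  | a :: b :: t => if a = b then pvG t ++ [2 * a] else pvG (b :: t) ++ [a]
  termination_by l => l.length
  decreasing_by all_goals (simp only [List.length_cons]; omega)

theorem pvG_nil : pvG [] = [] := by rw [pvG]
theorem pvG_single (a : Int) : pvG [a] = [a] := by rw [pvG]
theorem pvG_cons_cons (a b : Int) (t : List Int) :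
    pvG (a :: b :: t) = if a = b then pvG t ++ [2 * a] else pvG (b :: t) ++ [a] := by
  conv_lhs => rw [pvG]

theorem pvFilter_eq (l acc : List Int) :
    l.foldl (fun acc i => if i ≠ 0 then acc ++ [i] else acc) acc = acc ++ l.filter (· ≠ 0) := by
  induction l generalizing acc with
  | nil => simp
  | cons x xs ih =>
    rw [List.foldl_cons]
    by_cases hx : x = 0
    · rw [if_neg (by simp [hx]), ih, List.filter_cons, if_neg (by simp [hx])]
    · rw [if_pos (by simp [hx]), ih, List.filter_cons, if_pos (by simp [hx])]
      simp

theorem pvAPad_eq (n : Nat) (s : List Int) : pvAPad n s = List.replicate n 0 ++ s := by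
  induction n generalizing s with
  | zero => simp [pvAPad]
  | succ n ih =>
    have h : (if s = [] then s ++ [0] else 0 :: s) = 0 :: s := by
      split <;> simp_all
    rw [pvAPad, h, ih, List.replicate_succ' ]
    simp

theorem pvTake_rev (l : List Int) (n : Nat) (h : n < l.length) :
    (l.take (n + 1)).reverse = l.getD n 0 :: (l.take n).reverse := by
  rw [List.take_add_one]
  simp [List.getD, List.getElem?_eq_getElem h]

theorem pvAMerge_eq (l : List Int) (n : Nat) (h : n ≤ l.length) (s : List Int) :
    pvAMerge l n s = pvG ((l.take n).reverse) ++ s := by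
  induction n using Nat.strong_induction_on generalizing s with
  | _ n ih =>
  match n, h with
  | 0, _ => simp [pvAMerge, pvG_nil]
  | 1, h =>
    have h0 : 0 < l.length := by omega
    rw [pvAMerge]
    simp only [ge_iff_le]
    rw [if_neg (by omega)]
    · rw [pvAMerge, pvTake_rev l 0 h0, List.take_zero, List.reverse_nil, pvG_single]
      simp
  | (m + 2), h =>
    have h1 : m + 1 < l.length := by omega
    have h0 : m < l.length := by omega
    rw [pvAMerge]
    rw [pvTake_rev l (m + 1) h1, pvTake_rev l m h0]
    by_cases heq : l.getD (m + 1) 0 = l.getD m 0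
    · rw [if_pos ⟨by omega, by simpa using heq⟩]
      have hcons : (if s = [] then s ++ [l.getD (m+1) 0 * 2] else l.getD (m+1) 0 * 2 :: s)
          = l.getD (m+1) 0 * 2 :: s := by split <;> simp_all
      rw [hcons, ih (m + 1 - 1) (by omega) (by omega)]
      rw [pvG_cons_cons, if_pos heq]
      simp [mul_comm]
    · rw [if_neg (fun hc => heq (by simpa using hc.2))]
      rw [ih (m + 1) (by omega) (by omega), pvTake_rev l m h0]
      rw [pvG_cons_cons, if_neg heq]
      simp

theorem pvG_replicate (c : Nat) (v : Int) : pvG (List.replicate c v) = pvEmit v c := by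
  induction c using Nat.strong_induction_on with
  | _ c ih =>
  match c with
  | 0 => simp [pvG_nil, pvEmit]
  | 1 => simp [pvG_single, pvEmit]
  | (m + 2) =>
    rw [List.replicate_succ, List.replicate_succ, pvG_cons_cons, if_pos rfl, ih m (by omega)]
    have h2 : (m + 2) % 2 = m % 2 := by omega
    have h3 : (m + 2) / 2 = m / 2 + 1 := by omega
    rw [pvEmit, pvEmit, h2, h3, List.replicate_succ']
    simp

theorem pvG_append_run (s : List Int) (c : Nat) (v : Int) (h : s.getLast? ≠ some v) :
    pvG (s ++ List.replicate c v) = pvEmit v c ++ pvG s := by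
  induction s using pvG.induct with
  | case1 => simp [pvG_replicate, pvG_nil]
  | case2 a =>
    match c with
    | 0 => simp [pvEmit]
    | m + 1 =>
      have hav : a ≠ v := by simpa using h
      rw [List.singleton_append, List.replicate_succ, pvG_cons_cons, if_neg hav,
        ← List.replicate_succ, pvG_replicate, pvG_single]
  | case3 b t ih =>
    have htlast : t.getLast? ≠ some v := by
      match t with
      | [] =>
        simp only [List.getLast?_nil]
        intro hc; cases hc
      | u :: us =>
        rwa [List.getLast?_cons_cons, List.getLast?_cons_cons] at h
    rw [List.cons_append, List.cons_append, pvG_cons_cons, if_pos rfl,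
      ih htlast, pvG_cons_cons, if_pos rfl]
    simp
  | case4 a b t hab ih =>
    have hlast' : (b :: t).getLast? ≠ some v := by
      rwa [List.getLast?_cons_cons] at h
    rw [List.cons_append, List.cons_append, pvG_cons_cons, if_neg hab, ← List.cons_append,
      ih hlast', pvG_cons_cons, if_neg hab]
    simp

theorem pvBLoop_eq (l : List Int) (v : Int) (c : Nat) (out : List Int)
    (hv : c ≠ 0 → v ≠ 0) :
    pvBLoop l v c out = out ++ pvG ((List.replicate c v ++ l.filter (· ≠ 0)).reverse) := by
  induction l generalizing v c out with
  | nil => simp [pvBLoop, pvG_replicate]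
  | cons x xs ih =>
    rw [pvBLoop]
    by_cases hx : x = 0
    · rw [if_pos hx, ih v c out hv]
      simp [List.filter, hx]
    · rw [if_neg hx]
      by_cases hrun : c ≠ 0 ∧ x = v
      · rw [if_pos hrun, ih v (c + 1) out (by intro _; exact hv hrun.1)]
        have : List.replicate c v ++ List.filter (· ≠ 0) (x :: xs)
            = List.replicate (c + 1) v ++ List.filter (· ≠ 0) xs := by
          simp [hrun.2, List.replicate_succ', hv hrun.1]
        rw [this]
      · rw [if_neg hrun, ih x 1 (out ++ pvEmit v c) (fun _ => hx)]
        have hfil : List.filter (· ≠ 0) (x :: xs) = x :: List.filter (· ≠ 0) xs := by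
          simp [hx]
        rw [hfil]
        match c with
        | 0 => simp [pvEmit]
        | m + 1 =>
          have hxv : x ≠ v := fun hc => hrun ⟨by omega, hc⟩
          have hrev : (List.replicate (m + 1) v ++ x :: List.filter (· ≠ 0) xs).reverse
              = (x :: List.filter (· ≠ 0) xs).reverse ++ List.replicate (m + 1) v := by
            simp [List.reverse_append]
          rw [hrev, pvG_append_run _ (m + 1) v (by simp [hxv])]
          simp

-- ===== VERDICT (by name: the statement is the Claim_ definition above) =====
theorem push_right_spec : Claim_equal_push_right := by
  intro input_list _
  unfold Spec_push_right push_right push_right_alt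
  simp only []
  rw [pvFilter_eq input_list []]
  rw [pvAMerge_eq _ _ le_rfl []]
  rw [pvBLoop_eq input_list 0 0 [] (by simp)]
  simp [List.take_length]
  rw [pvAPad_eq]
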